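-- pv_equiv track=rewrite | github.com/RobertFlemingii/summary-statistics | summaryStatistics.py | find_bucketed_mode
-- ===== SOURCE A (Python) =====
-- def find_bucketed_mode(array):
--     # take an array and return the most frequently occuring multiple of 10
--     frequency = {}
--     for i in array:
--         if i // 10 * 10 in frequency:
--             frequency[i // 10 * 10] += 1
--         else:
--             frequency[i // 10 * 10] = 1
--
--     max_frequency = find_max(list(frequency.values()))
--     mode = [key for key, value in frequency.items() if value == max_frequency]
--     return int(mode[0])
--
-- def find_max(list):
--     # take an array and return the maximum
--     maximum = list[0]
--     for i in list:
--         if i > maximum: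
--             maximum = i
--     return maximum
-- ===== SOURCE B (Python) =====
-- def find_bucketed_mode(array):
--     # take an array and return the most frequently occuring multiple of 10
--     # brute force: no frequency table at all; max() is first-wins, so ties
--     # resolve to the bucket of the earliest element, like A's insertion order
--     buckets = [i // 10 * 10 for i in array]
--     return int(max(buckets, key=buckets.count))
-- ===== Notes on version B (the rewrite author's own statement) =====
-- stated objective: alternative
-- what changed: B drops the frequency dictionary entirely: it maps each element to its bucket and takes a brute-force first-wins argmax max(buckets, key=buckets.count), recounting occurrences per element instead of building and scanning a counting table; ties resolve to the earliest element's bucket, matching A's insertion-order mode[0].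
import Mathlib
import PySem

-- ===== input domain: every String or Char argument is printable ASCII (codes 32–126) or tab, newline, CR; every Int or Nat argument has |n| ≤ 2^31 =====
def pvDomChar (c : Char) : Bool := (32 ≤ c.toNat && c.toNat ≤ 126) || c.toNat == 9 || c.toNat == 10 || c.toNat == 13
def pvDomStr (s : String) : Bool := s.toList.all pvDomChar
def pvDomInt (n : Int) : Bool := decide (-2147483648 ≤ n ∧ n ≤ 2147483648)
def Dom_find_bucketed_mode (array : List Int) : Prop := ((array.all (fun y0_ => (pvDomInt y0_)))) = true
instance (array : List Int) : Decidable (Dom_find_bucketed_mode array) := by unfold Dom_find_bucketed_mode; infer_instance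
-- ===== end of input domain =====

-- B drops A's frequency dictionary entirely: it is the brute-force first-wins argmax
-- max(buckets, key=buckets.count) over the bucket list (alternative decomposition;
-- O(n^2) instead of A's dict counting). Both raise on an empty array (excluded by Pre_).

-- ===== PORT A =====
-- port of find_max (A's helper); list[0] raises IndexError on [], unreachable under Pre_
def pvFindMax (list : List Int) : Int :=
  match list with
  | [] => 0
  | m :: _ => list.foldl (fun maximum i => if i > maximum then i else maximum) m

def find_bucketed_mode (array : List Int) : Int :=
  let frequency := array.foldl (fun d i =>
    if d.contains (PySem.Int.floordiv i 10 * 10) then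
      d.insert (PySem.Int.floordiv i 10 * 10) (d.getD (PySem.Int.floordiv i 10 * 10) 0 + 1)
    else
      d.insert (PySem.Int.floordiv i 10 * 10) 1) PySem.Dict.empty
  let max_frequency := pvFindMax frequency.values
  let mode := (frequency.items.filter (fun kv => kv.2 == max_frequency)).map (fun kv => kv.1)
  match mode with
  | m :: _ => m      -- mode[0]; [] raises IndexError, unreachable under Pre_
  | [] => 0

-- ===== PORT B =====
def find_bucketed_mode_alt (array : List Int) : Int :=
  let buckets := array.map (fun i => PySem.Int.floordiv i 10 * 10)
  match PySem.List.max? buckets (fun b => buckets.count b) with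
  | some m => m
  | none => 0        -- max() of an empty list raises ValueError, unreachable under Pre_

-- ===== PRECONDITION & SPEC =====
-- A raises (IndexError inside find_max) exactly on the empty array, where B's max() raises too.
def Pre_find_bucketed_mode (array : List Int) : Prop := array ≠ []
instance (array : List Int) : Decidable (Pre_find_bucketed_mode array) := by unfold Pre_find_bucketed_mode; infer_instance
def pvWitness_find_bucketed_mode : List Int := [3, -17, 5]

def Spec_find_bucketed_mode (array : List Int) (out : Int) : Prop := out = find_bucketed_mode_alt array
instance (array : List Int) (out : Int) : Decidable (Spec_find_bucketed_mode array out) := by unfold Spec_find_bucketed_mode; infer_instance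

-- ===== CLAIM (what is proved, stated in full; the proofs are below) =====
def Claim_equal_find_bucketed_mode : Prop := ∀ (array : List Int), Dom_find_bucketed_mode array → Pre_find_bucketed_mode array → Spec_find_bucketed_mode array (find_bucketed_mode array)

-- ===== LEMMAS AND PROOFS =====

-- A's dict-building step, with the contains-test folded away
def pvStep (d : PySem.Dict Int Int) (b : Int) : PySem.Dict Int Int :=
  d.insert b (d.getD b 0 + 1)

-- running maximum of f over a list (0 for [])
def pvMv (f : Int → Nat) (l : List Int) : Nat := l.foldr (fun y m => max (f y) m) 0

-- the fold step of PySem.List.max? (definitionally)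
def pvStepM (f : Int → Nat) (acc : Option Int) (x : Int) : Option Int :=
  match acc with
  | none => some x
  | some m => if f m < f x then some x else some m

theorem pv_step_eq (d : PySem.Dict Int Int) (i : Int) :
    (if d.contains (PySem.Int.floordiv i 10 * 10) then
      d.insert (PySem.Int.floordiv i 10 * 10) (d.getD (PySem.Int.floordiv i 10 * 10) 0 + 1)
    else
      d.insert (PySem.Int.floordiv i 10 * 10) 1) = pvStep d (PySem.Int.floordiv i 10 * 10) := by
  unfold pvStep
  cases hc : d.contains (PySem.Int.floordiv i 10 * 10) with
  | true => rw [if_pos rfl]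
  | false =>
    rw [if_neg (by simp), PySem.Dict.getD_of_not_contains (h := hc)]
    norm_num

-- A's loop over array = the uniform counting loop over the bucket list
theorem pv_dict_eq (arr : List Int) (d : PySem.Dict Int Int) :
    arr.foldl (fun d i =>
      if d.contains (PySem.Int.floordiv i 10 * 10) then
        d.insert (PySem.Int.floordiv i 10 * 10) (d.getD (PySem.Int.floordiv i 10 * 10) 0 + 1)
      else
        d.insert (PySem.Int.floordiv i 10 * 10) 1) d
    = (arr.map (fun i => PySem.Int.floordiv i 10 * 10)).foldl pvStep d := by
  rw [List.foldl_map]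
  exact PySem.List.foldl_congr_mem _ _ _ _ (fun acc x _ => pv_step_eq acc x)

theorem pvMv_cons (f : Int → Nat) (x : Int) (t : List Int) :
    pvMv f (x :: t) = max (f x) (pvMv f t) := rfl

theorem pvMv_le (f : Int → Nat) (l : List Int) : ∀ y ∈ l, f y ≤ pvMv f l := by
  induction l with
  | nil => simp
  | cons x t ih =>
    intro y hy
    rw [pvMv_cons]
    rcases List.mem_cons.mp hy with rfl | hy
    · exact le_max_left _ _
    · exact le_trans (ih y hy) (le_max_right _ _)

theorem pvMv_attain (f : Int → Nat) (l : List Int) (h : l ≠ []) :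
    ∃ y ∈ l, f y = pvMv f l := by
  induction l with
  | nil => exact absurd rfl h
  | cons x t ih =>
    rw [pvMv_cons]
    by_cases hx : pvMv f t ≤ f x
    · exact ⟨x, by simp, by omega⟩
    · obtain ⟨y, hy, hfy⟩ := ih (by rintro rfl; simp [pvMv] at hx)
      exact ⟨y, by simp [hy], by omega⟩

-- an accumulator already maximal survives the argmax fold
theorem pvM1 (f : Int → Nat) (t : List Int) (a : Int) (h : ∀ y ∈ t, f y ≤ f a) :
    t.foldl (pvStepM f) (some a) = some a := by
  induction t with
  | nil => rfl
  | cons z r ih =>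
    have hz : ¬ f a < f z := not_lt.mpr (h z (by simp))
    simp only [List.foldl_cons, pvStepM, hz, if_false]
    exact ih (fun y hy => h y (by simp [hy]))

-- an accumulator strictly below the maximum is replaced by the first attainer
theorem pvM2 (f : Int → Nat) (t : List Int) (a : Int) (h : f a < pvMv f t) :
    t.foldl (pvStepM f) (some a) = t.find? (fun y => decide (pvMv f t ≤ f y)) := by
  induction t generalizing a with
  | nil => simp [pvMv] at h
  | cons z r ih =>
    rw [pvMv_cons] at h
    by_cases hz : pvMv f r ≤ f z
    · -- head attains the max
      have hmax : max (f z) (pvMv f r) = f z := by omega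
      have haz : f a < f z := by omega
      simp only [List.foldl_cons, pvStepM, haz, if_pos, List.find?_cons]
      rw [pvMv_cons, hmax]
      simp only [le_refl, decide_true]
      exact pvM1 f r z (fun y hy => le_trans (pvMv_le f r y hy) hz)
    · -- maximum lives in the tail
      have hmax : max (f z) (pvMv f r) = pvMv f r := by omega
      have hzr : ¬ (pvMv f (z :: r) ≤ f z) := by rw [pvMv_cons]; omega
      rw [List.find?_cons_of_neg (by simpa using hzr)]
      simp only [List.foldl_cons, pvStepM]
      rw [pvMv_cons, hmax]
      by_cases haz : f a < f z
      · rw [if_pos haz]; exact ih z (by omega)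
      · rw [if_neg haz]; exact ih a (by omega)

-- Python's max(l, key=f) is the FIRST element attaining the maximum value
theorem pvM3 (f : Int → Nat) (h : Int) (t : List Int) :
    PySem.List.max? (h :: t) f = (h :: t).find? (fun y => decide (pvMv f (h :: t) ≤ f y)) := by
  have hstep : PySem.List.max? (h :: t) f = t.foldl (pvStepM f) (some h) := by
    simp only [PySem.List.max?, List.foldl_cons]
    exact PySem.List.foldl_congr_mem _ _ _ _ (fun acc x _ => by cases acc <;> rfl)
  rw [hstep, pvMv_cons]
  by_cases hh : pvMv f t ≤ f h
  · rw [List.find?_cons_of_pos (by simp; omega)]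
    exact pvM1 f t h (fun y hy => le_trans (pvMv_le f t y hy) hh)
  · rw [List.find?_cons_of_neg (by simp; omega)]
    have : max (f h) (pvMv f t) = pvMv f t := by omega
    rw [this]
    exact pvM2 f t h (by omega)

theorem pv_find?_congr (l : List Int) (p q : Int → Bool) (h : ∀ x ∈ l, p x = q x) :
    l.find? p = l.find? q := by
  induction l with
  | nil => rfl
  | cons x t ih =>
    cases hp : p x with
    | true => rw [List.find?_cons_of_pos hp, List.find?_cons_of_pos ((h x (by simp)) ▸ hp)]
    | false =>
      rw [List.find?_cons_of_neg (by simp [hp]), List.find?_cons_of_neg (by simp [← h x (by simp), hp])]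
      exact ih (fun y hy => h y (by simp [hy]))

-- dropping elements equal to a p-failing value does not change find?
theorem pv_find?_discard (s : List Int) (x : Int) (p : Int → Bool) (hx : p x = false) :
    (s.filter (fun y => !(y == x))).find? p = s.find? p := by
  induction s with
  | nil => rfl
  | cons z r ih =>
    by_cases hz : z = x
    · subst hz
      rw [List.filter_cons_of_neg (by simp), List.find?_cons_of_neg (by simp [hx])]
      exact ih
    · rw [List.filter_cons_of_pos (by simp [hz])]
      cases hp : p z with
      | true => rw [List.find?_cons_of_pos hp, List.find?_cons_of_pos hp]
      | false => rw [List.find?_cons_of_neg (by simp [hp]), List.find?_cons_of_neg (by simp [hp])]; exact ih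

-- find? over the first-occurrence dedup = find? over the list itself
theorem pv_find?_dedup (l : List Int) (p : Int → Bool) :
    (PySem.List.dedup l).find? p = l.find? p := by
  induction l with
  | nil => rfl
  | cons x t ih =>
    simp only [PySem.List.dedup_eq_ofList] at ih ⊢
    rw [PySem.Set.ofList_cons]
    cases hp : p x with
    | true => rw [List.find?_cons_of_pos hp, List.find?_cons_of_pos hp]
    | false =>
      rw [List.find?_cons_of_neg (by simp [hp]), List.find?_cons_of_neg (by simp [hp])]
      rw [← ih]
      exact pv_find?_discard _ x p hp

-- A's find_max is a true maximum: member and upper bound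
theorem pvFindMax_char (v : Int) (vs : List Int) :
    (pvFindMax (v :: vs) ∈ v :: vs) ∧ ∀ y ∈ v :: vs, y ≤ pvFindMax (v :: vs) := by
  have heq : pvFindMax (v :: vs) = vs.foldl max v := by
    show (v :: vs).foldl (fun maximum i => if i > maximum then i else maximum) v = _
    rw [List.foldl_cons]
    have : (fun (maximum i : Int) => if i > maximum then i else maximum) = max := by
      funext m i; simp only [gt_iff_lt, max_def]; split_ifs <;> omega
    rw [this, ite_self]
  rw [heq]
  refine ⟨?_, ?_⟩
  · rcases PySem.List.foldl_max_mem vs v with h | h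
    · simp [h]
    · simp [h]
  · intro y hy
    rcases List.mem_cons.mp hy with h | hy
    · exact h ▸ (PySem.List.le_foldl_max vs v).1
    · exact (PySem.List.le_foldl_max vs v).2 y hy

-- ===== VERDICT (by name: the statement is the Claim_ definition above) =====
theorem find_bucketed_mode_spec : Claim_equal_find_bucketed_mode := by
  intro array _ hPre
  unfold Spec_find_bucketed_mode
  -- shared data
  set bs := array.map (fun i => PySem.Int.floordiv i 10 * 10) with hbs
  have hbsne : bs ≠ [] := by
    cases array with
    | nil => exact absurd rfl hPre
    | cons a r => simp [hbs]
  set f : Int → Nat := fun b => bs.count b with hf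
  set d := bs.foldl pvStep PySem.Dict.empty with hd
  -- dict facts
  have hps : (pvStep : PySem.Dict Int Int → Int → PySem.Dict Int Int)
      = fun d x => d.insert x (d.getD x 0 + 1) := rfl
  have hk : d.keys = PySem.List.dedup bs := by
    rw [hd, hps, PySem.Dict.keys_foldl_insert (f := fun d x => d.getD x 0 + 1)]
    rfl
  have hnd : d.keys.Nodup := by
    rw [hk]; simp only [PySem.List.dedup_eq_ofList]; exact PySem.Set.nodup_ofList bs
  have hcnt : ∀ k, d.getD k 0 = ((f k : Nat) : Int) := by
    intro k
    rw [hd, hps, PySem.Dict.getD_foldl_insert_add_one, PySem.Dict.getD_empty]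
    simp [hf]
  have hitem : ∀ kv ∈ d.items, kv.2 = ((f kv.1 : Nat) : Int) := by
    intro kv hkv
    have := PySem.Dict.getD_of_mem_items d (k := kv.1) (v := kv.2) (by simpa using hkv) hnd 0
    rw [hcnt kv.1] at this
    exact this.symm
  have hvals : d.values = d.keys.map (fun k => ((f k : Nat) : Int)) := by
    show d.items.map (fun x => x.2) = (d.items.map (fun x => x.1)).map _
    rw [List.map_map, List.map_congr_left (fun kv hkv => hitem kv hkv)]
    rfl
  -- A's value, rewritten step by step
  have hA : find_bucketed_mode array =
      match (d.items.filter (fun kv => kv.2 == pvFindMax d.values)).map (fun kv => kv.1) with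
      | m :: _ => m
      | [] => 0 := by
    simp only [find_bucketed_mode]
    rw [pv_dict_eq]
  -- keys nonempty
  have hkne : d.keys ≠ [] := by
    rw [hk]
    cases hb : bs with
    | nil => exact absurd hb hbsne
    | cons b r => simp [PySem.List.dedup_eq_ofList, PySem.Set.ofList_cons]
  obtain ⟨k0, ks, hkeq⟩ : ∃ k0 ks, d.keys = k0 :: ks := by
    cases hkc : d.keys with
    | nil => exact absurd hkc hkne
    | cons k0 ks => exact ⟨k0, ks, rfl⟩
  -- max_frequency = the maximum bucket count, as an Int
  set MA := pvFindMax d.values with hMA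
  have hvcons : d.values = ((f k0 : Nat) : Int) :: ks.map (fun k => ((f k : Nat) : Int)) := by
    rw [hvals, hkeq]; rfl
  have hchar := pvFindMax_char (((f k0 : Nat) : Int)) (ks.map (fun k => ((f k : Nat) : Int)))
  rw [← hvcons] at hchar
  have hMANat : MA = ((pvMv f bs : Nat) : Int) := by
    apply le_antisymm
    · -- MA is the count of some key, every key is a bucket
      have hmem : MA ∈ d.values := hchar.1
      rw [hvals] at hmem
      obtain ⟨k, hkmem, hkeqv⟩ := List.mem_map.mp hmem
      have : k ∈ bs := by
        rw [hk] at hkmem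
        exact (PySem.List.mem_dedup (xs := bs) (x := k)).mp hkmem
      rw [← hkeqv]
      exact_mod_cast pvMv_le f bs k this
    · -- the maximum count is attained by some bucket, which is a key
      obtain ⟨y, hy, hfy⟩ := pvMv_attain f bs hbsne
      have hyk : y ∈ d.keys := by
        rw [hk]
        exact (PySem.List.mem_dedup (xs := bs) (x := y)).mpr hy
      have : ((f y : Nat) : Int) ∈ d.values := by
        rw [hvals]; exact List.mem_map_of_mem hyk
      calc ((pvMv f bs : Nat) : Int) = ((f y : Nat) : Int) := by rw [hfy]
        _ ≤ MA := hchar.2 _ this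
  -- A's mode list = keys filtered by "count equals the maximum"
  have hmode : (d.items.filter (fun kv => kv.2 == MA)).map (fun kv => kv.1)
      = d.keys.filter (fun k => f k == pvMv f bs) := by
    rw [List.filter_congr (q := fun kv => ((f kv.1 : Nat) : Int) == ((pvMv f bs : Nat) : Int))
      (fun kv hkv => by rw [hitem kv hkv, hMANat])]
    show _ = (d.items.map (fun x => x.1)).filter _
    rw [List.filter_map]
    congr 1
    apply List.filter_congr
    intro kv _
    simp [Function.comp, Nat.cast_inj]
  -- chain of find?s: A's first matching key = B's first-wins argmax
  have hfind : (d.keys.filter (fun k => f k == pvMv f bs)).head?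
      = PySem.List.max? bs f := by
    rw [List.head?_filter, hk, pv_find?_dedup]
    obtain ⟨b0, bt, hbeq⟩ : ∃ b0 bt, bs = b0 :: bt := by
      cases hbc : bs with
      | nil => exact absurd hbc hbsne
      | cons b0 bt => exact ⟨b0, bt, rfl⟩
    rw [hbeq, pvM3 f b0 bt, ← hbeq]
    apply pv_find?_congr
    intro x hx
    have hle := pvMv_le f bs x hx
    have hbq : ∀ (a b : Nat), (a == b) = decide (a = b) := fun a b => by
      by_cases h : a = b <;> simp [h]
    rw [hbq]
    rcases Nat.lt_or_ge (f x) (pvMv f bs) with hlt | hge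
    · rw [decide_eq_false (by omega), decide_eq_false (by omega)]
    · have : f x = pvMv f bs := by omega
      rw [decide_eq_true this, decide_eq_true (by omega)]
  -- assemble
  rw [hA, hmode]
  show (match List.filter (fun k => f k == pvMv f bs) d.keys with
      | m :: _ => m
      | [] => 0) =
    match PySem.List.max? bs (fun b => bs.count b) with
    | some m => m
    | none => 0
  cases hm : PySem.List.max? bs f with
  | none =>
    rw [hm] at hfind
    rw [List.head?_eq_none_iff.mp hfind]
  | some m =>
    rw [hm] at hfind
    cases hfl : d.keys.filter (fun k => f k == pvMv f bs) with
    | nil => rw [hfl] at hfind; simp at hfind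
    | cons a t =>
      rw [hfl] at hfind
      simp only [List.head?_cons, Option.some.injEq] at hfind
      simp [hfind]
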